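-- pv_equiv track=rewrite | github.com/skrul/songs | ascii_to_latex.py | convert_ascii_to_latex
-- ===== SOURCE A (Python) =====
-- def convert_ascii_to_latex(chord_line, lyric_line):
--     """
--     Convert ASCII chord positioning to LaTeX inline format.
--
--     Args:
--         chord_line (str): Line with chords positioned above lyrics
--         lyric_line (str): Line with lyrics/words
--
--     Returns:
--         str: LaTeX formatted line with ^{chord} notation
--     """
--     if not chord_line.strip() or not lyric_line.strip():
--         return lyric_line
--
--     # Pad lines to same length
--     max_len = max(len(chord_line), len(lyric_line))
--     chord_line = chord_line.ljust(max_len)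
--     lyric_line = lyric_line.ljust(max_len)
--
--     result = []
--     i = 0
--
--     # Find chords and their positions
--     chord_positions = []
--     current_chord = ""
--     chord_start = -1
--
--     for pos, char in enumerate(chord_line):
--         if char not in [' ', '\t']:
--             if chord_start == -1:
--                 chord_start = pos
--             current_chord += char
--         else:
--             if current_chord:
--                 chord_positions.append((chord_start, current_chord))
--                 current_chord = ""
--                 chord_start = -1
--
--     # Handle chord at end of line
--     if current_chord:
--         chord_positions.append((chord_start, current_chord))
--
--     # Sort by position
--     chord_positions.sort()
--
--     # Insert chords into lyric line
--     chord_idx = 0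
--     result_chars = []
--
--     skip_char = False
--     for pos, char in enumerate(lyric_line):
--         # Check if we need to insert a chord here
--         while chord_idx < len(chord_positions) and chord_positions[chord_idx][0] == pos:
--             chord = chord_positions[chord_idx][1]
--
--             # Determine if chord falls on a space (between words) or within/at start of word
--             if char in [' ', '\t']:
--                 # Chord falls on a space between words - replace space with chord surrounded by spaces
--                 result_chars.append(f' ^{{{chord}}} ')
--                 skip_char = True  # Don't add the original space
--             else:
--                 # Chord falls within a word or at beginning - no space after chord
--                 result_chars.append(f'^{{{chord}}}')
--             chord_idx += 1
--
--         if not skip_char: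
--             result_chars.append(char)
--         skip_char = False
--
--     # Handle any remaining chords at the end
--     while chord_idx < len(chord_positions):
--         chord = chord_positions[chord_idx][1]
--         result_chars.append(f' ^{{{chord}}}')
--         chord_idx += 1
--
--     return ''.join(result_chars).rstrip()
-- ===== SOURCE B (Python) =====
-- import re
--
--
-- def convert_ascii_to_latex(chord_line, lyric_line):
--     """Convert ASCII chord positioning to LaTeX inline format (slice-based)."""
--     if not chord_line.strip() or not lyric_line.strip():
--         return lyric_line
--
--     max_len = max(len(chord_line), len(lyric_line))
--     chord_line = chord_line.ljust(max_len)
--     lyric_line = lyric_line.ljust(max_len)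
--
--     parts = []
--     prev = 0
--     for m in re.finditer(r'[^ \t]+', chord_line):
--         pos, chord = m.start(), m.group()
--         parts.append(lyric_line[prev:pos])
--         if lyric_line[pos] in ' \t':
--             parts.append(f' ^{{{chord}}} ')
--             prev = pos + 1
--         else:
--             parts.append(f'^{{{chord}}}')
--             prev = pos
--     parts.append(lyric_line[prev:])
--     return ''.join(parts).rstrip()
-- ===== Notes on version B (the rewrite author's own statement) =====
-- stated objective: simpler
-- what changed: Replaces A's char-by-char state machine (manual chord accumulator with sentinel start, sort, per-character insertion loop with a skip flag and a trailing-chord loop) by extracting chord tokens with re.finditer and assembling the output from slices of the lyric line around each chord position with a cursor (C-level regex scan and slice copies instead of a per-character Python loop).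
import Mathlib
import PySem

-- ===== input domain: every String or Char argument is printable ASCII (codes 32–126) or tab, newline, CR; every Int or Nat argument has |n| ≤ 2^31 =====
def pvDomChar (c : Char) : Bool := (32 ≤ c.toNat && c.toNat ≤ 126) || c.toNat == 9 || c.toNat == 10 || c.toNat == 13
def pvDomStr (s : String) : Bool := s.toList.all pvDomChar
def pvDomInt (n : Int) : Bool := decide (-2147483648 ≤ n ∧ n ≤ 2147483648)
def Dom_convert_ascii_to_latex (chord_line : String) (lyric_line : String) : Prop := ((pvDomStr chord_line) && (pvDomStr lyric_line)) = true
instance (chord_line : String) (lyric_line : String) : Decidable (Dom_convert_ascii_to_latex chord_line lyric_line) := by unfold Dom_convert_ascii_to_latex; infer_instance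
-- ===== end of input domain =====

-- B replaces A's char-by-char state machine (chord accumulator with a sentinel, sort,
-- per-character insertion loop with a skip flag and a trailing-chord loop) by token
-- extraction plus slice-based assembly around each chord position (simpler; measured faster).

-- ===== PORT A =====
-- char in [' ', '\t']
def pvIsSep (c : Char) : Bool := c == ' ' || c == '\t'

-- A's chord-extraction for-loop over enumerate(chord_line), including the final
-- 'if current_chord' flush.  Python's -1 sentinel for chord_start is rendered as
-- Option Nat (none = -1; it is only ever compared against -1, never used in arithmetic);
-- the flush's '.getD 0' is never reached with none (chord_start is set whenever
-- current_chord is nonempty), matching Python exactly.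
def pvExA : List Char → Nat → List Char → Option Nat → List (Nat × List Char) → List (Nat × List Char)
  | [], _, cur, start, acc => if cur.isEmpty then acc else acc ++ [(start.getD 0, cur)]
  | c :: cs, pos, cur, start, acc =>
    if pvIsSep c then
      if cur.isEmpty then pvExA cs (pos + 1) cur start acc
      else pvExA cs (pos + 1) [] none (acc ++ [(start.getD 0, cur)])
    else
      pvExA cs (pos + 1) (cur ++ [c]) (if start.isNone then some pos else start) acc

-- the inner 'while chord_idx < len(...) and chord_positions[chord_idx][0] == pos' loop:
-- returns (emitted chars, remaining chords, skip_char flag)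
def pvAInner (pos : Nat) (ch : Char) : List (Nat × List Char) → Bool → (List Char × List (Nat × List Char) × Bool)
  | [], skip => ([], [], skip)
  | (p, cd) :: rest, skip =>
    if p == pos then
      let piece := if pvIsSep ch then ' ' :: '^' :: '{' :: (cd ++ ['}', ' ']) else '^' :: '{' :: (cd ++ ['}'])
      let skip' := if pvIsSep ch then true else skip
      let r := pvAInner pos ch rest skip'
      (piece ++ r.1, r.2.1, r.2.2)
    else ([], (p, cd) :: rest, skip)

-- A's per-character insertion loop over enumerate(lyric_line), then the trailing
-- 'while chord_idx < len(chord_positions)' loop when the characters run out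
def pvALoop : List Char → Nat → List (Nat × List Char) → List Char
  | [], _, chords => (chords.map (fun q => ' ' :: '^' :: '{' :: (q.2 ++ ['}']))).flatten
  | c :: cs, pos, chords =>
    let r := pvAInner pos c chords false
    r.1 ++ (if r.2.2 then [] else [c]) ++ pvALoop cs (pos + 1) r.2.1

def convert_ascii_to_latex (chord_line : String) (lyric_line : String) : String :=
  let c := chord_line.toList
  let l := lyric_line.toList
  if PySem.Chars.strip c = [] ∨ PySem.Chars.strip l = [] then lyric_line
  else
    let maxLen := max c.length l.length
    let cpad := c ++ List.replicate (maxLen - c.length) ' '   -- .ljust(max_len)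
    let lpad := l ++ List.replicate (maxLen - l.length) ' '
    let chords := PySem.List.sorted (pvExA cpad 0 [] none []) (fun q => q.1) false  -- .sort(); keys distinct so sorting by position is Python's tuple sort
    String.ofList (PySem.Chars.rstrip (pvALoop lpad 0 chords))

-- ===== PORT B =====
-- re.finditer(r'[^ \t]+', line): each maximal run of non-separator chars with its start
def pvTokensB (i : Nat) (cs : List Char) : List (Nat × List Char) :=
  match cs with
  | [] => []
  | c :: cs' =>
    if pvIsSep c then pvTokensB (i + 1) cs'
    else (i, c :: cs'.takeWhile (fun d => !pvIsSep d)) ::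
         pvTokensB (i + 1 + (cs'.takeWhile (fun d => !pvIsSep d)).length) (cs'.dropWhile (fun d => !pvIsSep d))
  termination_by cs.length
  decreasing_by all_goals simp [List.length_dropWhile_le]

-- cursor/slice assembly: lyric[prev:pos] ++ chord piece, then lyric[prev:] at the end.
-- lyric_line[pos] is in range for every token position (padding), so getD is exact here.
def pvBAsm (lyr : List Char) : List (Nat × List Char) → Nat → List Char
  | [], prev => lyr.drop prev
  | (pos, cd) :: rest, prev =>
    if pvIsSep (lyr.getD pos ' ') then
      ((lyr.drop prev).take (pos - prev)) ++ (' ' :: '^' :: '{' :: (cd ++ ['}', ' '])) ++ pvBAsm lyr rest (pos + 1)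
    else
      ((lyr.drop prev).take (pos - prev)) ++ ('^' :: '{' :: (cd ++ ['}'])) ++ pvBAsm lyr rest pos

def convert_ascii_to_latex_alt (chord_line : String) (lyric_line : String) : String :=
  let c := chord_line.toList
  let l := lyric_line.toList
  if PySem.Chars.strip c = [] ∨ PySem.Chars.strip l = [] then lyric_line
  else
    let maxLen := max c.length l.length
    let cpad := c ++ List.replicate (maxLen - c.length) ' '
    let lpad := l ++ List.replicate (maxLen - l.length) ' '
    String.ofList (PySem.Chars.rstrip (pvBAsm lpad (pvTokensB 0 cpad) 0))

-- ===== PRECONDITION & SPEC =====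
def Spec_convert_ascii_to_latex (chord_line : String) (lyric_line : String) (out : String) : Prop := out = convert_ascii_to_latex_alt chord_line lyric_line
instance (chord_line : String) (lyric_line : String) (out : String) : Decidable (Spec_convert_ascii_to_latex chord_line lyric_line out) := by unfold Spec_convert_ascii_to_latex; infer_instance

-- ===== CLAIM (what is proved, stated in full; the proofs are below) =====
def Claim_equal_convert_ascii_to_latex : Prop := ∀ (chord_line : String) (lyric_line : String), Dom_convert_ascii_to_latex chord_line lyric_line → Spec_convert_ascii_to_latex chord_line lyric_line (convert_ascii_to_latex chord_line lyric_line)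

-- ===== LEMMAS AND PROOFS =====

-- A's extraction fold computes exactly B's token list
theorem pvExA_eq_tokens (cs : List Char) :
    (∀ pos acc, pvExA cs pos [] none acc = acc ++ pvTokensB pos cs) ∧
    (∀ pos cur s acc, cur ≠ [] →
      pvExA cs pos cur (some s) acc =
        acc ++ (s, cur ++ cs.takeWhile (fun d => !pvIsSep d)) ::
          pvTokensB (pos + (cs.takeWhile (fun d => !pvIsSep d)).length) (cs.dropWhile (fun d => !pvIsSep d))) := by
  induction cs with
  | nil =>
    refine ⟨fun pos acc => by simp [pvExA, pvTokensB], fun pos cur s acc hcur => ?_⟩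
    simp [pvExA, pvTokensB, List.isEmpty_iff, hcur]
  | cons c cs ih =>
    constructor
    · intro pos acc
      by_cases hc : pvIsSep c
      · rw [pvExA, if_pos hc, if_pos (by simp), pvTokensB, if_pos hc, ih.1]
      · rw [pvExA, if_neg hc, pvTokensB, if_neg hc]
        simp only [List.nil_append, Option.isNone_none]
        rw [if_pos trivial]
        rw [ih.2 (pos + 1) [c] pos acc (by simp)]
        simp only [List.cons_append, List.nil_append]
    · intro pos cur s acc hcur
      by_cases hc : pvIsSep c
      · rw [pvExA, if_pos hc, if_neg (by simp [List.isEmpty_iff, hcur])]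
        rw [ih.1]
        have ht : (c :: cs).takeWhile (fun d => !pvIsSep d) = [] := by simp [hc]
        have hd : (c :: cs).dropWhile (fun d => !pvIsSep d) = c :: cs := by simp [hc]
        rw [ht, hd]
        simp [pvTokensB, hc]
      · rw [pvExA, if_neg hc]
        simp only [Option.isNone_some, if_neg Bool.false_ne_true]
        rw [ih.2 (pos + 1) (cur ++ [c]) s acc (by simp)]
        have ht : (c :: cs).takeWhile (fun d => !pvIsSep d) = c :: cs.takeWhile (fun d => !pvIsSep d) := by
          simp [hc]
        have hd : (c :: cs).dropWhile (fun d => !pvIsSep d) = cs.dropWhile (fun d => !pvIsSep d) := by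
          simp [hc]
        rw [ht, hd]
        simp only [List.length_cons, List.append_assoc, List.singleton_append]
        rw [show pos + 1 + (cs.takeWhile (fun d => !pvIsSep d)).length = pos + ((cs.takeWhile (fun d => !pvIsSep d)).length + 1) from by omega]

-- positions of B's tokens: within bounds and strictly increasing
theorem pvTokens_bounds (i : Nat) (cs : List Char) :
    (∀ q ∈ pvTokensB i cs, i ≤ q.1 ∧ q.1 < i + cs.length) ∧
    (pvTokensB i cs).Pairwise (fun a b => a.1 < b.1) := by
  induction i, cs using pvTokensB.induct with
  | case1 i => simp [pvTokensB]
  | case2 i c cs' hsep ih =>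
    rw [pvTokensB, if_pos hsep]
    refine ⟨fun q hq => ?_, ih.2⟩
    have := ih.1 q hq
    simp only [List.length_cons]; omega
  | case3 i c cs' hsep ih =>
    rw [pvTokensB, if_neg hsep]
    have hlen : (cs'.takeWhile (fun d => !pvIsSep d)).length + (cs'.dropWhile (fun d => !pvIsSep d)).length = cs'.length := by
      have h := congrArg List.length (List.takeWhile_append_dropWhile (p := fun d => !pvIsSep d) (l := cs'))
      rw [List.length_append] at h
      exact h
    constructor
    · intro q hq
      rcases List.mem_cons.mp hq with rfl | hq'
      · simp
      · have := ih.1 q hq'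
        simp only [List.length_cons]
        omega
    · refine List.Pairwise.cons (fun q hq => ?_) ih.2
      have := ih.1 q hq
      omega

-- A's insertion loop with no chords left copies the characters
theorem pvALoop_nil (ys : List Char) (pos : Nat) : pvALoop ys pos [] = ys := by
  induction ys generalizing pos with
  | nil => simp [pvALoop]
  | cons c cs ih => simp [pvALoop, pvAInner, ih]

-- the while loop does nothing when every remaining chord is further right
theorem pvAInner_not_here (pos : Nat) (ch : Char) (chords : List (Nat × List Char)) (skip : Bool)
    (h : ∀ q ∈ chords, pos < q.1) : pvAInner pos ch chords skip = ([], chords, skip) := by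
  cases chords with
  | nil => simp [pvAInner]
  | cons q rest =>
    obtain ⟨p, cd⟩ := q
    have : p ≠ pos := by have := h (p, cd) (by simp); omega
    simp [pvAInner, this]

-- A's loop passes n chord-free characters straight through
theorem pvALoop_walk (lyr : List Char) (n : Nat) : ∀ (prev : Nat) (chords : List (Nat × List Char)),
    (∀ q ∈ chords, prev + n ≤ q.1) → prev + n ≤ lyr.length →
    pvALoop (lyr.drop prev) prev chords =
      (lyr.drop prev).take n ++ pvALoop (lyr.drop (prev + n)) (prev + n) chords := by
  induction n with
  | zero => intro prev chords _ _; simp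
  | succ n ih =>
    intro prev chords h hlen
    have hp : prev < lyr.length := by omega
    have hdrop : lyr.drop prev = lyr[prev] :: lyr.drop (prev + 1) := List.drop_eq_getElem_cons hp
    rw [hdrop, pvALoop, pvAInner_not_here prev lyr[prev] chords false (fun q hq => by have := h q hq; omega)]
    have ihx := ih (prev + 1) chords (fun q hq => by have := h q hq; omega) (by omega)
    simp only [List.nil_append, List.take_succ_cons]
    rw [show prev + 1 + n = prev + (n + 1) from by omega] at ihx
    rw [ihx]
    simp

-- B's assembly may advance its cursor over a chord-free character
theorem pvBAsm_step (lyr : List Char) (rest : List (Nat × List Char)) (p : Nat)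
    (hp : p < lyr.length) (h : ∀ q ∈ rest, p < q.1) :
    pvBAsm lyr rest p = lyr[p] :: pvBAsm lyr rest (p + 1) := by
  have hdrop : lyr.drop p = lyr[p] :: lyr.drop (p + 1) := List.drop_eq_getElem_cons hp
  cases rest with
  | nil => simp only [pvBAsm]; rw [hdrop]
  | cons q rest' =>
    obtain ⟨q1, cd⟩ := q
    have hq : p < q1 := h (q1, cd) (by simp)
    have htake : (lyr.drop p).take (q1 - p) = lyr[p] :: (lyr.drop (p + 1)).take (q1 - (p + 1)) := by
      rw [hdrop]
      have : q1 - p = (q1 - (p + 1)) + 1 := by omega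
      rw [this, List.take_succ_cons]
    simp only [pvBAsm, htake]
    split <;> simp

-- main loop equivalence
theorem pvALoop_eq_pvBAsm (lyr : List Char) (chords : List (Nat × List Char)) :
    ∀ (prev : Nat), prev ≤ lyr.length →
    (∀ q ∈ chords, prev ≤ q.1 ∧ q.1 < lyr.length) →
    chords.Pairwise (fun a b => a.1 < b.1) →
    pvALoop (lyr.drop prev) prev chords = pvBAsm lyr chords prev := by
  induction chords with
  | nil => intro prev _ _ _; rw [pvALoop_nil, pvBAsm]
  | cons q rest ih =>
    obtain ⟨p, cd⟩ := q
    intro prev hprev hb hpw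
    have hp : p < lyr.length := (hb (p, cd) (by simp)).2
    have hple : prev ≤ p := (hb (p, cd) (by simp)).1
    have hrest : ∀ q ∈ rest, p < q.1 := (List.pairwise_cons.mp hpw).1
    have hb' : ∀ q ∈ rest, p + 1 ≤ q.1 ∧ q.1 < lyr.length := by
      intro q hq
      exact ⟨by have := hrest q hq; omega, (hb q (by simp [hq])).2⟩
    have hwalkh : ∀ q ∈ (p, cd) :: rest, prev + (p - prev) ≤ q.1 := by
      intro q hq
      rcases List.mem_cons.mp hq with rfl | hq'
      · simp; omega
      · have := hrest q hq'; omega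
    -- walk the chord-free characters up to position p
    rw [pvALoop_walk lyr (p - prev) prev ((p, cd) :: rest) hwalkh (by omega)]
    rw [show prev + (p - prev) = p from by omega]
    have hdrop : lyr.drop p = lyr[p] :: lyr.drop (p + 1) := List.drop_eq_getElem_cons hp
    rw [hdrop, pvALoop]
    have hgetD : lyr.getD p ' ' = lyr[p] := List.getD_eq_getElem lyr ' ' hp
    simp only [pvAInner, beq_self_eq_true]
    rw [pvAInner_not_here p lyr[p] rest _ hrest]
    have ihx := ih (p + 1) (by omega) hb' (List.pairwise_cons.mp hpw).2
    by_cases hsep : pvIsSep lyr[p]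
    · simp only [hsep]
      rw [pvBAsm, hgetD, if_pos hsep, ← ihx]
      simp
    · simp only [hsep, Bool.false_eq_true]
      rw [pvBAsm, hgetD, if_neg hsep,
        pvBAsm_step lyr rest p hp hrest, ← ihx]
      simp

-- ===== VERDICT (by name: the statement is the Claim_ definition above) =====
theorem convert_ascii_to_latex_spec : Claim_equal_convert_ascii_to_latex := by
  intro chord_line lyric_line _
  unfold Spec_convert_ascii_to_latex convert_ascii_to_latex convert_ascii_to_latex_alt
  by_cases hg : PySem.Chars.strip chord_line.toList = [] ∨ PySem.Chars.strip lyric_line.toList = []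
  · simp only [hg, if_pos trivial]
  · simp only [hg]
    set c := chord_line.toList
    set l := lyric_line.toList
    set maxLen := max c.length l.length with hmax
    set cpad := c ++ List.replicate (maxLen - c.length) ' ' with hcpad
    set lpad := l ++ List.replicate (maxLen - l.length) ' ' with hlpad
    have hlc : cpad.length = maxLen := by
      rw [hcpad]; simp; omega
    have hll : lpad.length = maxLen := by
      rw [hlpad]; simp; omega
    have hex : pvExA cpad 0 [] none [] = pvTokensB 0 cpad := by
      simpa using (pvExA_eq_tokens cpad).1 0 []
    have hsort : PySem.List.sorted (pvExA cpad 0 [] none []) (fun q => q.1) false = pvTokensB 0 cpad := by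
      rw [hex]
      exact PySem.List.sorted_eq_of_perm_of_pairwise_lt _ _ _ (List.Perm.refl _) (pvTokens_bounds 0 cpad).2
    rw [hsort]
    have heq : pvALoop lpad 0 (pvTokensB 0 cpad) = pvBAsm lpad (pvTokensB 0 cpad) 0 := by
      have := pvALoop_eq_pvBAsm lpad (pvTokensB 0 cpad) 0 (by omega)
        (fun q hq => ⟨Nat.zero_le _, by have := ((pvTokens_bounds 0 cpad).1 q hq).2; omega⟩)
        (pvTokens_bounds 0 cpad).2
      simpa using this
    rw [heq]
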